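-- pv_equiv track=rewrite | github.com/marcos3087/TrocaNomeDocs | main.py | ajustaString
-- ===== SOURCE A (Python) =====
-- def ajustaString(valor):
--     aux = valor.split("/")
--     val1 = ""
--     i=1
--     while(i<len(aux)):
--         val1 += fr"\{aux[i]}"
--         i+=1
--     valor = val1.replace("\#","")
--
--     return valor
-- ===== SOURCE B (Python) =====
-- def ajustaString(valor):
--     idx = valor.find("/")
--     if idx == -1:
--         return ""
--     return valor[idx:].replace("/", "\\").replace("\#", "")
-- ===== Notes on version B (the rewrite author's own statement) =====
-- stated objective: idiomatic
-- what changed: B drops A's split('/') list and the index-driven while-loop: it locates the first '/', takes the suffix valor[idx:], turns every '/' into a backslash with one replace, and strips '\#' as A does; no list of pieces is ever built.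
import Mathlib
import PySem

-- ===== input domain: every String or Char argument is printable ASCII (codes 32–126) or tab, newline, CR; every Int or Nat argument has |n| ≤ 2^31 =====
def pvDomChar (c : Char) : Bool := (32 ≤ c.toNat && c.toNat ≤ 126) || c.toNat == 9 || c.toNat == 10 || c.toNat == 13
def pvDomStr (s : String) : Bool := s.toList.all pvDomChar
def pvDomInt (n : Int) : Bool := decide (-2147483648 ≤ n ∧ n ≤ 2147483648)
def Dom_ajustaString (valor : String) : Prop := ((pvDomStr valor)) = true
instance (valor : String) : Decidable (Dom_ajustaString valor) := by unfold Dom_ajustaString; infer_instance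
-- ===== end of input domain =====

-- B replaces A's split-and-index-loop by find/slice/replace (no intermediate list of pieces); objective: idiomatic.

-- ===== PORT A =====
-- aux = valor.split("/"); while-loop over i = 1 .. len(aux)-1 appending "\" + aux[i]; then strip "\#".
def ajustaString (valor : String) : String :=
  let aux := (PySem.Str.split? valor "/").getD []   -- sep "/" is nonempty, so split? never returns none
  let val1 := (PySem.List.pyRange 1 (PySem.List.len aux)).foldl
      (fun val1 i => val1 ++ "\\" ++ PySem.List.pyGetD aux i "") ""
  PySem.Str.replace val1 "\\#" ""

-- ===== PORT B =====
-- idx = valor.find("/"); "" if absent, else valor[idx:] with "/"→"\" and "\#" removed.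
def ajustaString_alt (valor : String) : String :=
  let idx := PySem.Str.find valor "/"
  if idx = -1 then ""
  else PySem.Str.replace (PySem.Str.replace (PySem.Str.slice valor (some idx) none) "/" "\\") "\\#" ""

-- ===== PRECONDITION & SPEC =====
def Spec_ajustaString (valor : String) (out : String) : Prop := out = ajustaString_alt valor
instance (valor : String) (out : String) : Decidable (Spec_ajustaString valor out) := by unfold Spec_ajustaString; infer_instance

-- ===== CLAIM (what is proved, stated in full; the proofs are below) =====
def Claim_equal_ajustaString : Prop := ∀ (valor : String), Dom_ajustaString valor → Spec_ajustaString valor (ajustaString valor)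

-- ===== LEMMAS AND PROOFS =====

-- the single-char substitution '/' → '\' performed by replace("/", "\\")
def subSlash (c : Char) : Char := if c = '/' then '\\' else c

-- clean structural model of splitOn s ['/'] (cur = current piece, reversed)
def splitAux : List Char → List Char → List (List Char)
  | cur, [] => [cur.reverse]
  | cur, x :: t => if x = '/' then cur.reverse :: splitAux [] t else splitAux (x :: cur) t

-- suffix of l starting at the first '/', [] if none
def dropSlash : List Char → List Char
  | [] => []
  | x :: t => if x = '/' then x :: t else dropSlash t

theorem splitOn_go_spec (fuel : Nat) : ∀ (l cur : List Char) (acc : List (List Char)), l.length ≤ fuel →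
    PySem.Chars.splitOn.go ['/'] fuel l cur acc = acc.reverse ++ splitAux cur l := by
  induction fuel with
  | zero =>
    intro l cur acc h
    have : l = [] := by cases l <;> simp_all
    subst this
    simp [PySem.Chars.splitOn.go, splitAux]
  | succ n ih =>
    intro l cur acc h
    cases l with
    | nil => simp [PySem.Chars.splitOn.go, splitAux]
    | cons x t =>
      by_cases hx : x = '/'
      · subst hx
        rw [show PySem.Chars.splitOn.go ['/'] (n+1) ('/' :: t) cur acc
              = PySem.Chars.splitOn.go ['/'] n t [] (cur.reverse :: acc) by
            simp [PySem.Chars.splitOn.go, List.isPrefixOf]]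
        rw [ih t [] (cur.reverse :: acc) (by simpa using Nat.lt_succ_iff.mp (by simpa using h))]
        simp [splitAux]
      · rw [show PySem.Chars.splitOn.go ['/'] (n+1) (x :: t) cur acc
              = PySem.Chars.splitOn.go ['/'] n t (x :: cur) acc by
            simp [PySem.Chars.splitOn.go, List.isPrefixOf, Ne.symm hx]]
        rw [ih t (x :: cur) acc (by simpa using Nat.lt_succ_iff.mp (by simpa using h))]
        simp [splitAux, hx]

theorem splitOn_eq (cs : List Char) : PySem.Chars.splitOn cs ['/'] = splitAux [] cs := by
  unfold PySem.Chars.splitOn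
  rw [splitOn_go_spec (cs.length + 1) cs [] [] (by omega)]
  simp

theorem replace_go_spec (fuel : Nat) : ∀ (l acc : List Char), l.length ≤ fuel →
    PySem.Chars.replace.go ['/'] ['\\'] fuel l acc = acc.reverse ++ l.map subSlash := by
  induction fuel with
  | zero =>
    intro l acc h
    have : l = [] := by cases l <;> simp_all
    subst this
    simp [PySem.Chars.replace.go]
  | succ n ih =>
    intro l acc h
    cases l with
    | nil => simp [PySem.Chars.replace.go]
    | cons x t =>
      by_cases hx : x = '/'
      · subst hx
        rw [show PySem.Chars.replace.go ['/'] ['\\'] (n+1) ('/' :: t) acc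
              = PySem.Chars.replace.go ['/'] ['\\'] n t ('\\' :: acc) by
            simp [PySem.Chars.replace.go, List.isPrefixOf]]
        rw [ih t ('\\' :: acc) (by simpa using Nat.lt_succ_iff.mp (by simpa using h))]
        simp [subSlash]
      · rw [show PySem.Chars.replace.go ['/'] ['\\'] (n+1) (x :: t) acc
              = PySem.Chars.replace.go ['/'] ['\\'] n t (x :: acc) by
            simp [PySem.Chars.replace.go, List.isPrefixOf, Ne.symm hx]]
        rw [ih t (x :: acc) (by simpa using Nat.lt_succ_iff.mp (by simpa using h))]
        simp [subSlash, hx]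

theorem replace_slash (l : List Char) :
    PySem.Chars.replace l ['/'] ['\\'] = l.map subSlash := by
  unfold PySem.Chars.replace
  rw [if_neg (by simp), replace_go_spec l.length l [] le_rfl]
  simp

-- joining ALL pieces of splitAux with '\' prefixes
theorem flatten_splitAux (l : List Char) : ∀ cur,
    ((splitAux cur l).map (fun p => '\\' :: p)).flatten
      = '\\' :: (cur.reverse ++ l.map subSlash) := by
  induction l with
  | nil => intro cur; simp [splitAux]
  | cons x t ih =>
    intro cur
    by_cases hx : x = '/'
    · subst hx; simp [splitAux, ih, subSlash]
    · simp [splitAux, hx, ih, subSlash]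

-- joining the TAIL pieces (A's loop starts at i = 1)
theorem flatten_splitAux_tail (l : List Char) : ∀ cur,
    (((splitAux cur l).tail).map (fun p => '\\' :: p)).flatten
      = (dropSlash l).map subSlash := by
  induction l with
  | nil => intro cur; simp [splitAux, dropSlash]
  | cons x t ih =>
    intro cur
    by_cases hx : x = '/'
    · subst hx; simp [splitAux, dropSlash, flatten_splitAux, subSlash]
    · simp only [splitAux, dropSlash, if_neg hx]
      exact ih (x :: cur)

theorem dropSlash_of_not_mem : ∀ {l : List Char}, '/' ∉ l → dropSlash l = []
  | [], _ => rfl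
  | x :: t, h => by
    have hx : x ≠ '/' := by rintro rfl; exact h List.mem_cons_self
    rw [dropSlash, if_neg hx]
    exact dropSlash_of_not_mem (fun hm => h (List.mem_cons_of_mem _ hm))

theorem dropSlash_eq_drop : ∀ (cs : List Char) (n : Nat),
    (∀ i < n, ¬ ['/'] <+: cs.drop i) → ['/'] <+: cs.drop n → dropSlash cs = cs.drop n := by
  intro cs
  induction cs with
  | nil => intro n _ hp; simp_all
  | cons x t ih =>
    intro n hmin hp
    cases n with
    | zero =>
      rcases hp with ⟨u, hu⟩
      simp only [List.drop_zero, List.singleton_append] at hu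
      injection hu with h1 _
      subst h1
      simp [dropSlash]
    | succ m =>
      have hx : x ≠ '/' := by
        intro hx; subst hx
        exact hmin 0 (Nat.succ_pos m) ⟨t, rfl⟩
      have : dropSlash t = t.drop m :=
        ih m (fun i hi => by simpa using hmin (i+1) (by omega)) (by simpa using hp)
      simp [dropSlash, hx, this]

-- String fold with += "\"+p, on the list side
theorem foldl_parts (parts : List String) : ∀ (acc : String),
    (parts.foldl (fun a p => a ++ "\\" ++ p) acc).toList
      = acc.toList ++ (parts.map (fun p => '\\' :: p.toList)).flatten := by
  induction parts with
  | nil => intro acc; simp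
  | cons p ps ih =>
    intro acc
    simp [List.foldl_cons, ih, String.toList_append]

theorem ajustaString_eq_alt (valor : String) : ajustaString valor = ajustaString_alt valor := by
  unfold ajustaString ajustaString_alt
  dsimp only
  have hsplit : PySem.Str.split? valor "/" = some (((PySem.Str.split? valor "/").getD [])) := by
    have := PySem.Str.split?_map valor "/"
    cases h : PySem.Str.split? valor "/" with
    | none => rw [h] at this; simp [PySem.Chars.split?] at this
    | some xs => simp
  set aux : List String := (PySem.Str.split? valor "/").getD [] with haux
  have hmap : aux.map String.toList = PySem.Chars.splitOn valor.toList ['/'] := by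
    have := PySem.Str.split?_map valor "/"
    rw [hsplit] at this
    simpa [PySem.Chars.split?] using this
  -- A's loop becomes a fold over aux.drop 1
  rw [PySem.List.foldl_pyRange_pyGetD aux "" (fun a p => a ++ "\\" ++ p) "" (a := 1) (by omega)]
  simp only [show (1 : Int).toNat = 1 from rfl]
  -- its character content
  have hval : ((aux.drop 1).foldl (fun a p => a ++ "\\" ++ p) "").toList
      = (dropSlash valor.toList).map subSlash := by
    rw [foldl_parts]
    have hparts : (aux.drop 1).map String.toList = (splitAux [] valor.toList).tail := by
      have h2 := congrArg (List.drop 1) hmap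
      rw [splitOn_eq] at h2
      simpa [List.drop_one] using h2
    have hmt : (aux.drop 1).map (fun p => '\\' :: p.toList)
        = ((splitAux [] valor.toList).tail).map (fun p => '\\' :: p) := by
      rw [← hparts, List.map_map]; rfl
    rw [hmt, flatten_splitAux_tail]
    rfl
  have h1 : -1 ≤ PySem.Chars.find valor.toList ['/'] := PySem.Chars.neg_one_le_find _ _
  have hSC : PySem.Str.find valor "/" = PySem.Chars.find valor.toList ['/'] := by
    simp [PySem.Str.find]
  by_cases hf : PySem.Str.find valor "/" = -1
  · -- no '/': the loop body never runs, both sides are ""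
    have hnm : '/' ∉ valor.toList := by
      have := (PySem.Chars.find_eq_neg_one_iff valor.toList ['/']).mp (hSC ▸ hf)
      simpa [List.singleton_infix_iff] using this
    rw [if_pos hf]
    have hz : ((aux.drop 1).foldl (fun a p => a ++ "\\" ++ p) "") = "" := by
      rw [← String.ofList_toList (s := (aux.drop 1).foldl (fun a p => a ++ "\\" ++ p) ""), hval,
        dropSlash_of_not_mem hnm]
      rfl
    rw [hz]
    decide
  · -- '/' present at index idx = find ≥ 0
    rw [if_neg hf]
    have h0 : 0 ≤ PySem.Str.find valor "/" := by rw [hSC] at hf ⊢; omega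
    have hspec := PySem.Chars.find_spec (s := valor.toList) (sub := ['/'])
      (by rw [hSC] at h0; exact h0)
    have hdrop : dropSlash valor.toList
        = valor.toList.drop (PySem.Chars.find valor.toList ['/']).toNat :=
      dropSlash_eq_drop _ _ (fun i hi => hspec.2 i hi) hspec.1
    -- B's slice is that very suffix
    have hslice : PySem.Chars.slice valor.toList (some (PySem.Str.find valor "/")) none
        = dropSlash valor.toList := by
      rw [PySem.Chars.slice_eq_listSlice, PySem.List.slice_from _ h0, hSC, hdrop]
    -- both sides are replace …"\#"→"" of the same character list
    simp only [PySem.Str.replace, PySem.Str.slice, String.toList_ofList,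
      show ("/" : String).toList = ['/'] from by simp,
      show ("\\" : String).toList = ['\\'] from by simp,
      show ("\\#" : String).toList = ['\\', '#'] from by simp,
      show ("" : String).toList = [] from rfl]
    exact congrArg String.ofList (by rw [hval, hslice, replace_slash])

-- ===== VERDICT (by name: the statement is the Claim_ definition above) =====
theorem ajustaString_spec : Claim_equal_ajustaString := by
  intro valor _
  unfold Spec_ajustaString
  exact ajustaString_eq_alt valor
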